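-- pv_equiv track=rewrite | github.com/DatobyWS/Glix | agents/context_analysis_agent.py | _build_summary_for_claude
-- ===== SOURCE A (Python) =====
-- from typing import Any, Dict, List, Set
--
-- def _build_summary_for_claude(
--
--     segments: List[Dict[str, Any]],
--     conversation_ids: List[int],
-- ) -> str:
--     """
--     Build a condensed summary of the transcript for Claude.
--     Takes first and last segment of each conversation group.
--     """
--     if not segments:
--         return ""
--
--     conv_groups: Dict[int, List[Dict[str, Any]]] = {}
--     for seg, conv_id in zip(segments, conversation_ids):
--         conv_groups.setdefault(conv_id, []).append(seg)
--
--     summary_parts = []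
--     for conv_id in sorted(conv_groups.keys()):
--         group = conv_groups[conv_id]
--         texts = [s.get("text", "") for s in group]
--         if len(texts) <= 3:
--             summary_parts.append(" ".join(texts))
--         else:
--             # First 2 and last 1 sentences
--             summary_parts.append(
--                 f"{texts[0]} {texts[1]} [...] {texts[-1]}"
--             )
--
--     return "\n\n".join(summary_parts)
-- ===== SOURCE B (Python) =====
-- def _build_summary_for_claude(segments, conversation_ids):
--     pairs = list(zip(segments, conversation_ids))
--     parts = []
--     for k in sorted({cid for _, cid in pairs}):
--         texts = [seg.get("text", "") for seg, cid in pairs if cid == k]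
--         if len(texts) <= 3:
--             parts.append(" ".join(texts))
--         else:
--             parts.append(f"{texts[0]} {texts[1]} [...] {texts[-1]}")
--     return "\n\n".join(parts)
-- ===== Notes on version B (the rewrite author's own statement) =====
-- stated objective: simpler
-- what changed: B drops the dict-of-groups entirely: it collects the distinct conversation ids as a set, sorts them, and builds each group's texts by a per-id filter over the zipped pairs; no early empty return needed.
import Mathlib
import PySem

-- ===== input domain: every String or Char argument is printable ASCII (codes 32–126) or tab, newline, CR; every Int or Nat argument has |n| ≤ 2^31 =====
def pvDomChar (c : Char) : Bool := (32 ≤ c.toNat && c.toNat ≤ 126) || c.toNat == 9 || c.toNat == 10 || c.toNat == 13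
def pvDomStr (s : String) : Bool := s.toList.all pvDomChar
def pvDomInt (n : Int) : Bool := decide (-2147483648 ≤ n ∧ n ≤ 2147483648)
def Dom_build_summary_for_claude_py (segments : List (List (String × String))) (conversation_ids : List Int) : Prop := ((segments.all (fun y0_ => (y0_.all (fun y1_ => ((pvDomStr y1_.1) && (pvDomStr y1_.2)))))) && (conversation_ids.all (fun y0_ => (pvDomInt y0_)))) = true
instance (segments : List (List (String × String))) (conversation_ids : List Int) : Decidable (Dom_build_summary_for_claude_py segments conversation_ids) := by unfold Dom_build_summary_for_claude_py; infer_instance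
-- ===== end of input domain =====

-- B replaces A's one-pass dict-of-groups by sorted distinct ids plus a per-id filter pass (simpler, same results).

-- ===== PORT A =====
-- seg.get("text", "") on a segment dict (assoc list) — first-match lookup
def pvSegText (s : List (String × String)) : String :=
  (PySem.Dict.mk s).getD "text" ""

def build_summary_for_claude_py (segments : List (List (String × String))) (conversation_ids : List Int) : String :=
  if segments = [] then ""
  else
    -- conv_groups.setdefault(conv_id, []).append(seg)  ==  d[cid] = d.get(cid, []) + [seg]  ==  Dict.modify
    let conv_groups : PySem.Dict Int (List (List (String × String))) :=
      (segments.zip conversation_ids).foldl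
        (fun d p => d.modify p.2 [] (fun g => g ++ [p.1])) PySem.Dict.empty
    let summary_parts :=
      (PySem.List.sorted conv_groups.keys (fun k => k) false).foldl
        (fun acc conv_id =>
          let group := conv_groups.getD conv_id []
          let texts := group.map pvSegText
          if texts.length ≤ 3 then
            acc ++ [PySem.Str.join " " texts]
          else
            -- texts[0], texts[1], texts[-1]: in this branch texts.length ≥ 4, all in range
            acc ++ [((PySem.List.pyGet? texts 0).getD "") ++ " " ++
                    ((PySem.List.pyGet? texts 1).getD "") ++ " [...] " ++
                    ((PySem.List.pyGet? texts (-1)).getD "")])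
        []
    PySem.Str.join "\n\n" summary_parts

-- ===== PORT B =====
def build_summary_for_claude_py_alt (segments : List (List (String × String))) (conversation_ids : List Int) : String :=
  let pairs := segments.zip conversation_ids
  let parts :=
    (PySem.List.sorted (PySem.Set.ofList (pairs.map (·.2))) (fun k => k) false).map
      (fun k =>
        let texts := (pairs.filter (fun p => p.2 == k)).map (fun p => pvSegText p.1)
        if texts.length ≤ 3 then
          PySem.Str.join " " texts
        else
          ((PySem.List.pyGet? texts 0).getD "") ++ " " ++
          ((PySem.List.pyGet? texts 1).getD "") ++ " [...] " ++
          ((PySem.List.pyGet? texts (-1)).getD ""))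
  PySem.Str.join "\n\n" parts

-- ===== PRECONDITION & SPEC =====
def Spec_build_summary_for_claude_py (segments : List (List (String × String))) (conversation_ids : List Int) (out : String) : Prop := out = build_summary_for_claude_py_alt segments conversation_ids
instance (segments : List (List (String × String))) (conversation_ids : List Int) (out : String) : Decidable (Spec_build_summary_for_claude_py segments conversation_ids out) := by unfold Spec_build_summary_for_claude_py; infer_instance

-- ===== CLAIM (what is proved, stated in full; the proofs are below) =====
def Claim_equal_build_summary_for_claude_py : Prop := ∀ (segments : List (List (String × String))) (conversation_ids : List Int), Dom_build_summary_for_claude_py segments conversation_ids → Spec_build_summary_for_claude_py segments conversation_ids (build_summary_for_claude_py segments conversation_ids)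

-- ===== LEMMAS AND PROOFS =====

-- 'for x in l: acc.append(if p x then f x else g x)' builds l.map of that conditional
theorem pv_foldl_ite_append_map {α β : Type} (l : List α) (p : α → Prop) [DecidablePred p]
    (f g : α → β) (acc : List β) :
    l.foldl (fun a x => if p x then a ++ [f x] else a ++ [g x]) acc
      = acc ++ l.map (fun x => if p x then f x else g x) := by
  induction l generalizing acc with
  | nil => simp
  | cons x xs ih => by_cases h : p x <;> simp [List.foldl_cons, ih, h, List.append_assoc]

theorem pv_main : ∀ (segments : List (List (String × String))) (conversation_ids : List Int),
    build_summary_for_claude_py segments conversation_ids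
      = build_summary_for_claude_py_alt segments conversation_ids := by
  intro segments conversation_ids
  unfold build_summary_for_claude_py build_summary_for_claude_py_alt
  by_cases hs : segments = []
  · subst hs; simp [PySem.Str.join]
  · simp only [if_neg hs]
    set l := segments.zip conversation_ids with hl
    -- rewrite A's grouping fold via the swapped pair list
    have hswap : l.foldl (fun d p => d.modify p.2 [] (fun g => g ++ [p.1]))
          (PySem.Dict.empty : PySem.Dict Int (List (List (String × String))))
        = (l.map Prod.swap).foldl (fun d p => d.modify p.1 [] (fun g => g ++ [p.2]))
            PySem.Dict.empty := by
      rw [List.foldl_map]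
      simp
    rw [hswap]
    have hkeys : ((l.map Prod.swap).foldl
          (fun d p => d.modify p.1 [] (fun g => g ++ [p.2]))
          (PySem.Dict.empty : PySem.Dict Int (List (List (String × String))))).keys
        = PySem.Set.ofList (l.map (·.2)) := by
      have := PySem.Dict.keys_foldl_modify_key (l.map Prod.swap) (fun p => p.1)
        ([] : List (List (String × String)))
        (fun d p g => g ++ [p.2])
        (PySem.Dict.empty : PySem.Dict Int (List (List (String × String))))
      rw [this]
      simp [PySem.Dict.keys_empty, PySem.Set.update_nil_left, List.map_map, Function.comp_def]
    have hgetD : ∀ k : Int, ((l.map Prod.swap).foldl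
          (fun d p => d.modify p.1 [] (fun g => g ++ [p.2]))
          (PySem.Dict.empty : PySem.Dict Int (List (List (String × String))))).getD k []
        = (l.filter (fun p => p.2 == k)).map (·.1) := by
      intro k
      have := PySem.Dict.getD_foldl_modify_append (l.map Prod.swap)
        (PySem.Dict.empty : PySem.Dict Int (List (List (String × String)))) k
      rw [this]
      simp [PySem.Dict.getD_empty, List.filter_map, List.map_map, Function.comp_def]
    rw [hkeys]
    simp only [hgetD, List.map_map]
    rw [pv_foldl_ite_append_map]
    simp [Function.comp_def]

-- ===== VERDICT (by name: the statement is the Claim_ definition above) =====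
theorem build_summary_for_claude_py_spec : Claim_equal_build_summary_for_claude_py := by
  intro segments conversation_ids _
  unfold Spec_build_summary_for_claude_py
  exact pv_main segments conversation_ids
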